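-- pv_equiv track=rewrite | github.com/sumeetbansaloo7/PythonSortingVisualisation | insertionSort.py | colours
-- ===== SOURCE A (Python) =====
-- def colours(length, key, j=0):
--     cols = []
--     for i in range(length):
--         if i == key:
--             cols.append('blue')
--         elif i < key:
--             cols.append('green')
--         else:
--             cols.append("yellow")
--
--     if j != 0:
--         cols[j] = 'red'
--     return cols
-- ===== SOURCE B (Python) =====
-- def colours(length, key, j=0):
--     g = max(0, min(key, length))
--     blue = 1 if 0 <= key < length else 0
--     cols = ['green'] * g + ['blue'] * blue + ['yellow'] * (length - g - blue)
--     if j != 0: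
--         cols[j] = 'red'
--     return cols
-- ===== Notes on version B (the rewrite author's own statement) =====
-- stated objective: simpler
-- what changed: Replaces the per-index loop with three branch conditions by a closed-form construction: concatenate replicated 'green'/'blue'/'yellow' bands whose sizes are computed by clamping key into [0,length], then apply the same cols[j]='red' overwrite.
import Mathlib
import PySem

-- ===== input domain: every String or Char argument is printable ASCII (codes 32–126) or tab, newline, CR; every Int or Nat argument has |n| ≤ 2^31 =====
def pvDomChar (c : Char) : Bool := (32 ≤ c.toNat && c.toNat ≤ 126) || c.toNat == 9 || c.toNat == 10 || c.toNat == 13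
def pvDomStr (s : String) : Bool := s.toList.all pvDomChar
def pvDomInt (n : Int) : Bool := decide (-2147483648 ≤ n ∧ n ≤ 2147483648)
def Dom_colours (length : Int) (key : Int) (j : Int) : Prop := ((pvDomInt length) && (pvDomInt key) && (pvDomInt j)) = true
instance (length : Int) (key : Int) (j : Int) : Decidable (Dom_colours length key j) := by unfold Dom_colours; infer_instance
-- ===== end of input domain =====

-- B builds the list as concatenated colour bands (closed-form counts) instead of A's per-index loop;
-- objective: simpler. The final cols[j]='red' mutation is the same step in both.

-- ===== PORT A =====
def colours (length : Int) (key : Int) (j : Int) : List String :=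
  let cols := (PySem.List.pyRange 0 length 1).foldl
    (fun acc i =>
      acc ++ [if i = key then "blue" else if i < key then "green" else "yellow"]) []
  if j ≠ 0 then PySem.List.pySetD cols j "red" else cols

-- ===== PORT B =====
def colours_alt (length : Int) (key : Int) (j : Int) : List String :=
  let g := max 0 (min key length)
  let blue : Int := if 0 ≤ key ∧ key < length then 1 else 0
  let cols := List.replicate g.toNat "green" ++ List.replicate blue.toNat "blue"
      ++ List.replicate (length - g - blue).toNat "yellow"
  if j ≠ 0 then PySem.List.pySetD cols j "red" else cols

-- ===== PRECONDITION & SPEC =====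
-- Pre_ excludes exactly the inputs where A raises IndexError on cols[j] = 'red'
-- (j ≠ 0 and j outside Python's index range for the built list); B raises there too.
def Pre_colours (length : Int) (key : Int) (j : Int) : Prop :=
  j = 0 ∨ (-length ≤ j ∧ j < length)
instance (length : Int) (key : Int) (j : Int) : Decidable (Pre_colours length key j) := by
  unfold Pre_colours; infer_instance
def pvWitness_colours : Int × Int × Int := (5, 2, 3)

def Spec_colours (length : Int) (key : Int) (j : Int) (out : List String) : Prop := out = colours_alt length key j
instance (length : Int) (key : Int) (j : Int) (out : List String) : Decidable (Spec_colours length key j out) := by unfold Spec_colours; infer_instance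

-- ===== CLAIM (what is proved, stated in full; the proofs are below) =====
def Claim_equal_colours : Prop := ∀ (length : Int) (key : Int) (j : Int), Dom_colours length key j → Pre_colours length key j → Spec_colours length key j (colours length key j)

-- ===== LEMMAS AND PROOFS =====

-- A's loop body appended as singletons is a map over the range
lemma coreA_eq_map (length key : Int) :
    (PySem.List.pyRange 0 length 1).foldl
      (fun acc i =>
        acc ++ [if i = key then "blue" else if i < key then "green" else "yellow"]) []
    = (PySem.List.pyRange 0 length 1).map
        (fun i => if i = key then "blue" else if i < key then "green" else "yellow") := by
  simpa using PySem.List.foldl_append_singleton_eq_map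
    (fun i => if i = key then "blue" else if i < key then "green" else "yellow")
    (PySem.List.pyRange 0 length 1) []

-- the mapped range equals B's three bands
lemma map_eq_bands (length key : Int) :
    (PySem.List.pyRange 0 length 1).map
        (fun i => if i = key then "blue" else if i < key then "green" else "yellow")
    = List.replicate (max 0 (min key length)).toNat "green"
      ++ List.replicate (if 0 ≤ key ∧ key < length then (1:Int) else 0).toNat "blue"
      ++ List.replicate (length - max 0 (min key length)
          - (if 0 ≤ key ∧ key < length then (1:Int) else 0)).toNat "yellow" := by
  rcases le_or_gt length 0 with hle | hpos
  · rw [PySem.List.pyRange_one_eq_nil (by omega)]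
    have h1 : (max 0 (min key length)).toNat = 0 := by omega
    have h2 : ¬ (0 ≤ key ∧ key < length) := by omega
    simp [h1, h2]
    omega
  · obtain ⟨n, rfl⟩ : ∃ n : Nat, length = (n : Int) :=
      ⟨length.toNat, by omega⟩
    clear hpos
    induction n with
    | zero =>
      simp [PySem.List.pyRange_one_eq_nil]
      split_ifs <;> omega
    | succ m ih =>
      have hstep : PySem.List.pyRange 0 ((m + 1 : Nat) : Int) 1
          = PySem.List.pyRange 0 (m : Int) 1 ++ [(m : Int)] := by
        have := PySem.List.pyRange_one_succ_right (a := 0) (b := (m : Int)) (by omega)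
        push_cast
        push_cast at this
        exact this
      rw [hstep, List.map_append, ih]
      push_cast
      simp only [List.map_cons, List.map_nil]
      by_cases heq : key = (m : Int)
      · -- new element is the blue one
        have g1 : (max 0 (min key ((m : Int) + 1))).toNat = m := by omega
        have g2 : (max 0 (min key (m : Int))).toNat = m := by omega
        have b1 : (0 ≤ key ∧ key < (m : Int) + 1) := by omega
        have b2 : ¬ (0 ≤ key ∧ key < (m : Int)) := by omega
        have y1 : ((m : Int) + 1 - max 0 (min key ((m : Int) + 1)) - 1).toNat = 0 := by omega
        have y2 : ((m : Int) - max 0 (min key (m : Int)) - 0).toNat = 0 := by omega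
        rw [if_pos heq.symm, if_pos b1, if_neg b2, g1, g2]
        rw [y1]
        rw [y2]
        simp
      · by_cases hlt : key < (m : Int)
        · -- new element is a yellow one at the very end
          have hne : ¬ ((m : Int) = key) := by omega
          have hnl : ¬ ((m : Int) < key) := by omega
          have g12 : max 0 (min key ((m : Int) + 1)) = max 0 (min key (m : Int)) := by omega
          have b12 : ((0 ≤ key ∧ key < (m : Int) + 1) ↔ (0 ≤ key ∧ key < (m : Int))) := by omega
          have y1 : ((m : Int) + 1 - max 0 (min key (m : Int))
              - (if 0 ≤ key ∧ key < (m : Int) then (1:Int) else 0)).toNat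
            = ((m : Int) - max 0 (min key (m : Int))
              - (if 0 ≤ key ∧ key < (m : Int) then (1:Int) else 0)).toNat + 1 := by
            split_ifs <;> omega
          rw [if_neg hne, if_neg hnl, g12]
          simp only [b12]
          rw [y1, List.replicate_succ']
          simp
        · -- key > m : new element is a green one; the green band grows
          have hne : ¬ ((m : Int) = key) := by omega
          have hl : (m : Int) < key := by omega
          have g1 : (max 0 (min key ((m : Int) + 1))).toNat = m + 1 := by omega
          have g2 : (max 0 (min key (m : Int))).toNat = m := by omega
          have b1 : ¬ (0 ≤ key ∧ key < (m : Int) + 1) := by omega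
          have b2 : ¬ (0 ≤ key ∧ key < (m : Int)) := by omega
          have y1 : ((m : Int) + 1 - max 0 (min key ((m : Int) + 1)) - 0).toNat = 0 := by omega
          have y2 : ((m : Int) - max 0 (min key (m : Int)) - 0).toNat = 0 := by omega
          rw [if_neg hne, if_pos hl, if_neg b1, if_neg b2, g1, g2, y1, y2,
            List.replicate_succ']
          simp

-- ===== VERDICT (by name: the statement is the Claim_ definition above) =====
theorem colours_spec : Claim_equal_colours := by
  intro length key j _ _
  unfold Spec_colours colours colours_alt
  rw [coreA_eq_map, map_eq_bands]
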